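-- pv_equiv track=rewrite | github.com/OtoStanko/supporting_scripts | scale-free_rbn_generation.py | create_update_function_stm
-- ===== SOURCE A (Python) =====
-- def build_up_fun_rec(part_fun):
--     if part_fun == []:
--         return ""
--     if len(part_fun) == 1:
--         neg1 = "Not(" * (part_fun[0][1] != part_fun[0][2])
--         neg2 = ")" * (neg1 != "")
--         return " " + neg1 + "n[" + str(part_fun[0][0]) + "]" + neg2
--     node_index, Im, Om = part_fun[0]
--     if Im == Om:
--         if Im == 0:
--             return " And(n[" + str(node_index) + "], " + build_up_fun_rec(part_fun[1:]) + ")"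
--         else:
--             return " Or(n[" + str(node_index) + "], " + build_up_fun_rec(part_fun[1:]) + ")"
--     else:
--         if Im == 0:
--             return " Or( Not(n[" + str(node_index) + "]), " + build_up_fun_rec(part_fun[1:]) + ")"
--         else:
--             return " And( Not(n[" + str(node_index) + "]), " + build_up_fun_rec(part_fun[1:]) + ")"
--
-- def create_update_function_stm(rules):
--     functions = []
--     counter = 0
--     for node_table in rules:
--         function = "n[" + str(counter) + "] ==" + build_up_fun_rec(node_table)
--         functions.append(function)
--         counter += 1
--     return functions
-- ===== SOURCE B (Python) =====
-- def create_update_function_stm(rules):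
--     functions = []
--     for counter, table in enumerate(rules):
--         rev = list(reversed(table))
--         if not rev:
--             body = ""
--         else:
--             idx, Im, Om = rev[0]
--             if Im != Om:
--                 body = " Not(n[" + str(idx) + "])"
--             else:
--                 body = " n[" + str(idx) + "]"
--             for idx, Im, Om in rev[1:]:
--                 if Im == Om:
--                     pre = " And(n[" if Im == 0 else " Or(n["
--                     body = pre + str(idx) + "], " + body + ")"
--                 else:
--                     pre = " Or( Not(n[" if Im == 0 else " And( Not(n["
--                     body = pre + str(idx) + "]), " + body + ")"
--         functions.append("n[" + str(counter) + "] ==" + body)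
--     return functions
-- ===== Notes on version B (the rewrite author's own statement) =====
-- stated objective: alternative
-- what changed: build_up_fun_rec's structural recursion (leaf = head on singleton, wrapper = head, recurse on the tail) is replaced by an iterative back-to-front fold: reverse the table, seed the accumulator with the leaf string for the last element, then wrap it once per remaining element; the per-node loop uses enumerate instead of a manual counter.
import Mathlib
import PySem

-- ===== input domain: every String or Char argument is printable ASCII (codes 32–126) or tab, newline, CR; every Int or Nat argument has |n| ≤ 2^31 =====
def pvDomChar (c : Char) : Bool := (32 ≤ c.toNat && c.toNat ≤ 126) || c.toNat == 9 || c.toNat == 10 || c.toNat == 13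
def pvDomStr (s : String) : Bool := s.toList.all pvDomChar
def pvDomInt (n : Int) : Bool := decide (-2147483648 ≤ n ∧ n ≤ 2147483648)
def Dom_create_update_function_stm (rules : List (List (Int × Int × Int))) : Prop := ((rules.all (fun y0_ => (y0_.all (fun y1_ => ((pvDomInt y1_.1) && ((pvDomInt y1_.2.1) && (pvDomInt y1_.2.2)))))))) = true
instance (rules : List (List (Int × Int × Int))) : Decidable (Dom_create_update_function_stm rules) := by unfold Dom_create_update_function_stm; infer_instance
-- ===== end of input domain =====

-- B replaces build_up_fun_rec's structural recursion by an iterative back-to-front fold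
-- over the reversed table (objective: alternative decomposition, same cost).


-- ===== PORT A =====
-- literal port of build_up_fun_rec: recursion on the list, part_fun[1:] is the tail
def build_up_fun_rec : List (Int × Int × Int) → String
  | [] => ""
  | [(i, im, om)] =>
      let neg1 := if im ≠ om then "Not(" else ""
      let neg2 := if neg1 ≠ "" then ")" else ""
      " " ++ neg1 ++ "n[" ++ PySem.Int.toStr i ++ "]" ++ neg2
  | (node_index, im, om) :: rest =>
      if im = om then
        if im = 0 then
          " And(n[" ++ PySem.Int.toStr node_index ++ "], " ++ build_up_fun_rec rest ++ ")"
        else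
          " Or(n[" ++ PySem.Int.toStr node_index ++ "], " ++ build_up_fun_rec rest ++ ")"
      else
        if im = 0 then
          " Or( Not(n[" ++ PySem.Int.toStr node_index ++ "]), " ++ build_up_fun_rec rest ++ ")"
        else
          " And( Not(n[" ++ PySem.Int.toStr node_index ++ "]), " ++ build_up_fun_rec rest ++ ")"

def create_update_function_stm (rules : List (List (Int × Int × Int))) : List String :=
  (rules.foldl (fun (st : List String × Int) node_table =>
      (st.1 ++ ["n[" ++ PySem.Int.toStr st.2 ++ "] ==" ++ build_up_fun_rec node_table], st.2 + 1))
    ([], 0)).1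

-- ===== PORT B =====
-- B's leaf string for the last element of the table
def buf_leaf (t : Int × Int × Int) : String :=
  if t.2.1 ≠ t.2.2 then " Not(n[" ++ PySem.Int.toStr t.1 ++ "])"
  else " n[" ++ PySem.Int.toStr t.1 ++ "]"

-- B's one wrapping step: body = pre + str(idx) + mid + body + ")"
def buf_wrap (body : String) (t : Int × Int × Int) : String :=
  if t.2.1 = t.2.2 then
    (if t.2.1 = 0 then " And(n[" else " Or(n[") ++ PySem.Int.toStr t.1 ++ "], " ++ body ++ ")"
  else
    (if t.2.1 = 0 then " Or( Not(n[" else " And( Not(n[") ++ PySem.Int.toStr t.1 ++ "]), " ++ body ++ ")"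

-- body for one table: reverse, seed with the leaf, fold the wrappers
def buf_iter (table : List (Int × Int × Int)) : String :=
  match table.reverse with
  | [] => ""
  | last :: rest => rest.foldl buf_wrap (buf_leaf last)

def create_update_function_stm_alt (rules : List (List (Int × Int × Int))) : List String :=
  (PySem.List.enumerate rules 0).map
    (fun p => "n[" ++ PySem.Int.toStr p.1 ++ "] ==" ++ buf_iter p.2)

-- ===== PRECONDITION & SPEC =====
def Spec_create_update_function_stm (rules : List (List (Int × Int × Int))) (out : List String) : Prop := out = create_update_function_stm_alt rules
instance (rules : List (List (Int × Int × Int))) (out : List String) : Decidable (Spec_create_update_function_stm rules out) := by unfold Spec_create_update_function_stm; infer_instance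

-- ===== CLAIM (what is proved, stated in full; the proofs are below) =====
def Claim_equal_create_update_function_stm : Prop := ∀ (rules : List (List (Int × Int × Int))), Dom_create_update_function_stm rules → Spec_create_update_function_stm rules (create_update_function_stm rules)

-- ===== LEMMAS AND PROOFS =====

-- the two body builders agree on every table
lemma buf_iter_eq_rec (table : List (Int × Int × Int)) :
    buf_iter table = build_up_fun_rec table := by
  induction table with
  | nil => rfl
  | cons x t ih =>
    match t, ih with
    | [], _ =>
      obtain ⟨i, im, om⟩ := x
      simp only [buf_iter, List.reverse_cons, List.reverse_nil, List.nil_append,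
        List.foldl_nil, buf_leaf, build_up_fun_rec]
      by_cases h : im = om <;> simp [h, String.append_assoc]
    | y :: s, ih =>
      have hne : (y :: s).reverse ≠ [] := by simp
      obtain ⟨l, r, hr⟩ : ∃ l r, (y :: s).reverse = l :: r :=
        List.exists_cons_of_ne_nil hne
      obtain ⟨i, im, om⟩ := x
      have hrev : ((i, im, om) :: y :: s).reverse = l :: (r ++ [(i, im, om)]) := by
        simp [hr]
      have hiter : buf_iter ((i, im, om) :: y :: s)
          = buf_wrap (buf_iter (y :: s)) (i, im, om) := by
        simp only [buf_iter, hrev, hr, List.foldl_append, List.foldl_cons, List.foldl_nil]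
      rw [hiter, ih]
      simp only [buf_wrap, build_up_fun_rec]
      by_cases h1 : im = om
      · subst h1
        by_cases h2 : im = 0 <;> simp [h2, String.append_assoc]
      · by_cases h2 : im = 0 <;> simp [h1, h2, String.append_assoc]

-- A's foldl with explicit counter, generalized over the accumulator and the counter
lemma foldlA_eq (rules : List (List (Int × Int × Int))) (acc : List String) (c : Int) :
    (rules.foldl (fun (st : List String × Int) node_table =>
        (st.1 ++ ["n[" ++ PySem.Int.toStr st.2 ++ "] ==" ++ build_up_fun_rec node_table], st.2 + 1))
      (acc, c)).1
    = acc ++ (PySem.List.enumerate rules c).map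
        (fun p => "n[" ++ PySem.Int.toStr p.1 ++ "] ==" ++ buf_iter p.2) := by
  induction rules generalizing acc c with
  | nil => simp [PySem.List.enumerate_nil]
  | cons h t ih =>
    rw [List.foldl_cons, ih, PySem.List.enumerate_cons]
    simp [buf_iter_eq_rec]

-- ===== VERDICT (by name: the statement is the Claim_ definition above) =====
theorem create_update_function_stm_spec : Claim_equal_create_update_function_stm := by
  intro rules _
  unfold Spec_create_update_function_stm create_update_function_stm create_update_function_stm_alt
  rw [foldlA_eq]
  simp [buf_iter_eq_rec]
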